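-- pv_equiv track=rewrite | github.com/rahulgorle/GFG-POTD | Better String.py | betterString
-- ===== SOURCE A (Python) =====
-- def betterString(str1, str2):
--     mod = 10**9 + 7
--
--     # Function to calculate the number of distinct subsequences
--     def countDistinctSubsequences(s):
--         n = len(s)
--         last_occurrence = [-1] * 256
--         dp = [0] * (n + 1)
--         dp[0] = 1  # Empty string has one subsequence
--
--         for i in range(1, n + 1):
--             dp[i] = (2 * dp[i - 1]) % mod
--
--             if last_occurrence[ord(s[i - 1])] != -1:
--                 dp[i] = (dp[i] - dp[last_occurrence[ord(s[i - 1])]]) % mod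
--
--             last_occurrence[ord(s[i - 1])] = i - 1
--
--         return dp[n]
--
--     # Count distinct subsequences for both strings
--     count_str1 = countDistinctSubsequences(str1)
--     count_str2 = countDistinctSubsequences(str2)
--
--     # Return the better string
--     return str1 if count_str1 >= count_str2 else str2
-- ===== SOURCE B (Python) =====
-- def betterString(str1, str2):
--     mod = 10**9 + 7
--
--     # Count distinct subsequences grouped by their LAST character: ending[c] is
--     # the number of distinct non-empty subsequences ending in c.  Seeing c
--     # refreshes its group to 1 + total of all groups (append c to every
--     # subsequence, incl. the empty one).  Answer = 1 + total.  No dp array,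
--     # no last-occurrence positions, no subtraction.
--     def count(s):
--         ending = {}
--         for c in s:
--             ending[c] = (1 + sum(ending.values())) % mod
--         return (1 + sum(ending.values())) % mod
--
--     return str1 if count(str1) >= count(str2) else str2
-- ===== Notes on version B (the rewrite author's own statement) =====
-- stated objective: alternative
-- what changed: Counts distinct subsequences grouped by their last character (ending[c] = 1 + total of all groups), so there is no position-indexed dp array, no last-occurrence table and no subtraction step, at the cost of re-summing the groups each iteration.
import Mathlib
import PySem

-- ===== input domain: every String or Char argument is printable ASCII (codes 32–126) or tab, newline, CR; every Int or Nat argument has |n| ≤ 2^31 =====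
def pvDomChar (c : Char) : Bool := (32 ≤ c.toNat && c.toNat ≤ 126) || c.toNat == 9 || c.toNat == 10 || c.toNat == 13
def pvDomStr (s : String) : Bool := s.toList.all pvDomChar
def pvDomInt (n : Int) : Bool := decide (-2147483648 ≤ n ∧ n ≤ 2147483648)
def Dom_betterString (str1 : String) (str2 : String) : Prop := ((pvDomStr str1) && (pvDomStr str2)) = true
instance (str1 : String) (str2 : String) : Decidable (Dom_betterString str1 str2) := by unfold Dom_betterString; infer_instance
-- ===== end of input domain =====

-- B counts subsequences grouped by their last character (ending[c] = 1 + total of all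
-- groups) instead of A's prefix-dp array with a last-occurrence table and subtraction
-- (alternative algorithm, same results; B re-sums the groups each step).

set_option maxRecDepth 20000

def pvMod : Int := 1000000007

-- ===== PORT A =====
-- one iteration of A's 'for i in range(1, n+1)' loop; j = i - 1, state = (last_occurrence, dp)
def stepA (s : List Char) (st : List Int × List Int) (j : Nat) : List Int × List Int :=
  let c := s.getD j ' '
  let dp := st.2.set (j + 1) (PySem.Int.mod (2 * st.2.getD j 0) pvMod)
  let dp :=
    if st.1.getD c.toNat (-1) ≠ -1 then
      dp.set (j + 1) (PySem.Int.mod (dp.getD (j + 1) 0 - dp.getD (st.1.getD c.toNat (-1)).toNat 0) pvMod)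
    else dp
  (st.1.set c.toNat (j : Int), dp)

def countA (s : List Char) : Int :=
  let n := s.length
  let st := (List.range n).foldl (stepA s) (List.replicate 256 (-1), (List.replicate (n + 1) 0).set 0 1)
  st.2.getD n 0

def betterString (str1 : String) (str2 : String) : String :=
  if countA str1.toList ≥ countA str2.toList then str1 else str2

-- ===== PORT B =====
-- one iteration of B's 'for c in s' loop over the dict of per-last-character counts
def stepB (d : PySem.Dict Char Int) (c : Char) : PySem.Dict Char Int :=
  d.insert c (PySem.Int.mod (1 + d.values.sum) pvMod)

def countB (s : List Char) : Int :=
  PySem.Int.mod (1 + (s.foldl stepB PySem.Dict.empty).values.sum) pvMod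

def betterString_alt (str1 : String) (str2 : String) : String :=
  if countB str1.toList ≥ countB str2.toList then str1 else str2

-- ===== PRECONDITION & SPEC =====
def Spec_betterString (str1 : String) (str2 : String) (out : String) : Prop := out = betterString_alt str1 str2
instance (str1 : String) (str2 : String) (out : String) : Decidable (Spec_betterString str1 str2 out) := by unfold Spec_betterString; infer_instance

-- ===== CLAIM (what is proved, stated in full; the proofs are below) =====
def Claim_equal_betterString : Prop := ∀ (str1 : String) (str2 : String), Dom_betterString str1 str2 → Spec_betterString str1 str2 (betterString str1 str2)

-- ===== LEMMAS AND PROOFS =====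

-- dp value of B after j characters of s (the value B would return on s.take j)
def dpB (s : List Char) (j : Nat) : Int :=
  PySem.Int.mod (1 + ((s.take j).foldl stepB PySem.Dict.empty).values.sum) pvMod

theorem pv_getD_set_ne {l : List Int} {i j : Nat} {v d : Int} (h : i ≠ j) :
    (l.set i v).getD j d = l.getD j d := by
  simp [List.getD, List.getElem?_set_ne h]

theorem pv_getD_set_self {l : List Int} {i : Nat} {v d : Int} (h : i < l.length) :
    (l.set i v).getD i d = v := by
  simp [List.getD, h]

theorem pv_char_toNat_inj {c c' : Char} (h : c.toNat = c'.toNat) : c = c' :=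
  Char.ext (UInt32.toNat_inj.mp h)

theorem pv_mod_pos : (0 : Int) < pvMod := by norm_num [pvMod]

-- the single arithmetic fact both step cases reduce to:
-- A's new dp  mod(mod(2*mod(1+Σ)) - old)  =  B's new dp  mod(1 + (Σ + mod(1+Σ) - old))
theorem pv_mod_key (S old : Int) :
    PySem.Int.mod (PySem.Int.mod (2 * PySem.Int.mod (1 + S) pvMod) pvMod - old) pvMod
      = PySem.Int.mod (1 + (S + PySem.Int.mod (1 + S) pvMod - old)) pvMod := by
  simp only [PySem.Int.mod_eq_emod_of_pos pv_mod_pos]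
  have h1 : (2 * ((1 + S) % pvMod)) % pvMod = (2 * (1 + S)) % pvMod := by
    rw [Int.mul_emod, Int.emod_emod_of_dvd _ dvd_rfl, ← Int.mul_emod]
  rw [h1, Int.sub_emod, Int.emod_emod_of_dvd _ dvd_rfl, ← Int.sub_emod]
  have h2 : 1 + (S + (1 + S) % pvMod - old) = (1 + S - old) + (1 + S) % pvMod := by ring
  rw [h2, Int.add_emod, Int.emod_emod_of_dvd _ dvd_rfl, ← Int.add_emod]
  congr 1
  ring

theorem pv_mod_idem (x : Int) :
    PySem.Int.mod (PySem.Int.mod x pvMod) pvMod = PySem.Int.mod x pvMod := by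
  simp only [PySem.Int.mod_eq_emod_of_pos pv_mod_pos]
  exact Int.emod_emod_of_dvd _ dvd_rfl

-- replacing the unique item with key k in an assoc list changes the value-sum by v - w
theorem pv_sum_replace (l : List (Char × Int)) (k : Char) (v w : Int)
    (hnd : (l.map (·.1)).Nodup) (hmem : (k, w) ∈ l) :
    ((l.map (fun p => if p.1 == k then (k, v) else p)).map (·.2)).sum
      = (l.map (·.2)).sum + v - w := by
  induction l with
  | nil => cases hmem
  | cons p rest ih =>
    simp only [List.map_cons, List.nodup_cons] at hnd
    simp only [List.map_cons, List.sum_cons, beq_iff_eq]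
    by_cases hpk : p.1 = k
    · have hnotin : ∀ q ∈ rest, q.1 ≠ k := by
        intro q hq h
        exact hnd.1 (hpk ▸ h ▸ List.mem_map.mpr ⟨q, hq, rfl⟩)
      have hrest : rest.map (fun q => if q.1 = k then (k, v) else q) = rest := by
        have h1 : rest.map (fun q => if q.1 = k then (k, v) else q) = rest.map id :=
          List.map_congr_left (by intro q hq; simp [hnotin q hq])
        rw [h1, List.map_id]
      have hw : p.2 = w := by
        rcases List.mem_cons.mp hmem with h | h
        · rw [← h]
        · exact absurd (hpk ▸ List.mem_map.mpr ⟨(k, w), h, rfl⟩) hnd.1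
      rw [if_pos hpk, hrest, hw]
      ring
    · have hmem' : (k, w) ∈ rest := by
        rcases List.mem_cons.mp hmem with h | h
        · exact absurd (congrArg Prod.fst h.symm) hpk
        · exact h
      have hih := ih hnd.2 hmem'
      simp only [beq_iff_eq] at hih
      rw [if_neg hpk, hih]
      ring

theorem pv_values_def (d : PySem.Dict Char Int) : d.values = d.items.map (·.2) := rfl

theorem pv_sum_insert (d : PySem.Dict Char Int) (hnd : d.keys.Nodup) (k : Char) (v : Int) :
    (d.insert k v).values.sum = d.values.sum + v - d.getD k 0 := by
  have hnd' : (d.items.map (·.1)).Nodup := hnd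
  by_cases hc : d.contains k = true
  · have hsome : (d.get? k).isSome := by rw [← PySem.Dict.contains_eq_isSome_get?]; exact hc
    obtain ⟨w, hw⟩ := Option.isSome_iff_exists.mp hsome
    have hmem : (k, w) ∈ d.items := PySem.Dict.mem_items_of_get?_eq_some d hw
    have hgd : d.getD k 0 = w := PySem.Dict.getD_of_get?_eq_some d 0 hw
    rw [pv_values_def, PySem.Dict.items_insert_of_contains d v hc, hgd, pv_values_def]
    exact pv_sum_replace d.items k v w hnd' hmem
  · have hc' : d.contains k = false := by simpa using hc
    rw [pv_values_def, PySem.Dict.items_insert_of_not_contains d v hc',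
      PySem.Dict.getD_of_not_contains d 0 hc', pv_values_def]
    simp [List.map_append, List.sum_append]

theorem pv_nodup_fold (s : List Char) (k : Nat) :
    ((s.take k).foldl stepB PySem.Dict.empty).keys.Nodup := by
  have := PySem.Dict.nodup_keys_foldl_insert (s.take k)
    (fun d c => PySem.Int.mod (1 + d.values.sum) pvMod) PySem.Dict.empty
    (by exact PySem.Dict.nodup_keys_empty)
  exact this

theorem pv_invariant (s : List Char) (hs : ∀ c ∈ s, c.toNat < 256) (k : Nat) (hk : k ≤ s.length) :
    (((List.range k).foldl (stepA s) (List.replicate 256 (-1), (List.replicate (s.length + 1) 0).set 0 1)).1.length = 256) ∧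
    (((List.range k).foldl (stepA s) (List.replicate 256 (-1), (List.replicate (s.length + 1) 0).set 0 1)).2.length = s.length + 1) ∧
    (∀ j ≤ k, ((List.range k).foldl (stepA s) (List.replicate 256 (-1), (List.replicate (s.length + 1) 0).set 0 1)).2.getD j 0 = dpB s j) ∧
    (∀ c : Char, c.toNat < 256 →
      (((List.range k).foldl (stepA s) (List.replicate 256 (-1), (List.replicate (s.length + 1) 0).set 0 1)).1.getD c.toNat (-1) = -1 ∧
         ((s.take k).foldl stepB PySem.Dict.empty).contains c = false) ∨
      (∃ j, j < k ∧
         ((List.range k).foldl (stepA s) (List.replicate 256 (-1), (List.replicate (s.length + 1) 0).set 0 1)).1.getD c.toNat (-1) = (j : Int) ∧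
         ((s.take k).foldl stepB PySem.Dict.empty).getD c 0 = dpB s j)) := by
  induction k with
  | zero =>
    simp only [List.range_zero, List.foldl_nil, List.take_zero]
    refine ⟨by simp, by simp, ?_, ?_⟩
    · intro j hj
      interval_cases j
      rw [pv_getD_set_self (by simp)]
      simp [dpB, PySem.Dict.values, PySem.Dict.empty, pvMod]
    · intro c hc
      left
      constructor
      · simp only [List.getD, List.getElem?_replicate]
        split <;> rfl
      · simp [PySem.Dict.contains_empty]
  | succ k ih =>
    have hkn : k < s.length := hk
    obtain ⟨hL1, hL2, hb, hc⟩ := ih (Nat.le_of_lt hkn)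
    set Ak := (List.range k).foldl (stepA s) (List.replicate 256 (-1), (List.replicate (s.length + 1) 0).set 0 1) with hAk
    set Bd := (s.take k).foldl stepB PySem.Dict.empty with hBd
    have hrange : List.range (k + 1) = List.range k ++ [k] := List.range_succ
    have hgetc : s.getD k ' ' = s[k] := List.getD_eq_getElem s ' ' hkn
    set c0 : Char := s.getD k ' ' with hc0def
    have hc0mem : c0 ∈ s := by rw [hgetc]; exact s.getElem_mem hkn
    have hc0 : c0.toNat < 256 := hs c0 hc0mem
    have htake : s.take (k + 1) = s.take k ++ [c0] := by
      rw [List.take_add_one, List.getElem?_eq_getElem hkn, hgetc]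
      rfl
    have hBstep : (s.take (k + 1)).foldl stepB PySem.Dict.empty = stepB Bd c0 := by
      rw [htake, List.foldl_append]; rfl
    have hAstep : (List.range (k + 1)).foldl (stepA s) (List.replicate 256 (-1), (List.replicate (s.length + 1) 0).set 0 1)
        = stepA s Ak k := by rw [hrange, List.foldl_append]; rfl
    have hnd : Bd.keys.Nodup := hBd ▸ pv_nodup_fold s k
    have hdpk : Ak.2.getD k 0 = dpB s k := hb k le_rfl
    have hdpkS : dpB s k = PySem.Int.mod (1 + Bd.values.sum) pvMod := by rw [dpB, ← hBd]
    -- the new value B inserts is exactly dpB s k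
    have hins : stepB Bd c0 = Bd.insert c0 (dpB s k) := by rw [stepB, ← hdpkS]
    -- sum after insert
    have hsum : (Bd.insert c0 (dpB s k)).values.sum = Bd.values.sum + dpB s k - Bd.getD c0 0 :=
      pv_sum_insert Bd hnd c0 (dpB s k)
    -- dp recurrence: dpB s (k+1) in terms of Σ and old
    have hdpsucc : dpB s (k + 1)
        = PySem.Int.mod (1 + (Bd.values.sum + dpB s k - Bd.getD c0 0)) pvMod := by
      rw [dpB, hBstep, hins, hsum]
    rcases hc c0 hc0 with ⟨hlast, hcont⟩ | ⟨j, hjk, hlast, hgdj⟩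
    · -- c0 not seen yet: A doubles, B appends a fresh group
      have hold : Bd.getD c0 0 = 0 := PySem.Dict.getD_of_not_contains _ _ hcont
      have hAstep' : stepA s Ak k
          = (Ak.1.set c0.toNat (k : Int),
             Ak.2.set (k + 1) (PySem.Int.mod (2 * Ak.2.getD k 0) pvMod)) := by
        rw [stepA]
        simp only [← hc0def, hlast]
        simp
      rw [hAstep, hAstep']
      have hval : PySem.Int.mod (2 * Ak.2.getD k 0) pvMod = dpB s (k + 1) := by
        rw [hdpsucc, hold, hdpk, hdpkS]
        have := pv_mod_key Bd.values.sum 0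
        simpa [pv_mod_idem] using this
      refine ⟨by simp [hL1], by simp [hL2], ?_, ?_⟩
      · intro j hj
        rcases Nat.lt_or_ge j (k + 1) with hj' | hj'
        · rw [pv_getD_set_ne (by omega)]
          exact hb j (by omega)
        · have : j = k + 1 := by omega
          subst this
          rw [pv_getD_set_self (by simp [hL2]; omega), hval]
      · intro c hcc
        by_cases hceq : c = c0
        · subst hceq
          right
          refine ⟨k, by omega, ?_, ?_⟩
          · rw [pv_getD_set_self (by rw [hL1]; omega)]
          · rw [hBstep, hins, PySem.Dict.getD_insert]
            simp
        · have hne : c0.toNat ≠ c.toNat := fun h => hceq (pv_char_toNat_inj h.symm)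
          rw [pv_getD_set_ne hne, hBstep, hins]
          rcases hc c hcc with ⟨h1, h2⟩ | ⟨j, hj1, hj2, hj3⟩
          · left
            refine ⟨h1, ?_⟩
            rw [PySem.Dict.contains_insert]
            simp [hceq, h2]
          · right
            refine ⟨j, by omega, hj2, ?_⟩
            rw [PySem.Dict.getD_insert]
            simp [hceq, hj3]
    · -- c0 last seen at index j: A subtracts dp[j], B overwrites group c0
      have hold : Bd.getD c0 0 = dpB s j := hgdj
      have hdpj : Ak.2.getD j 0 = dpB s j := hb j (by omega)
      have hAstep' : stepA s Ak k
          = (Ak.1.set c0.toNat (k : Int),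
             (Ak.2.set (k + 1) (PySem.Int.mod (2 * Ak.2.getD k 0) pvMod)).set (k + 1)
               (PySem.Int.mod (PySem.Int.mod (2 * Ak.2.getD k 0) pvMod - dpB s j) pvMod)) := by
        rw [stepA]
        simp only [← hc0def, hlast]
        have hcond : ((j : Int) ≠ -1) := by omega
        simp only [if_pos hcond]
        have h1 : (Ak.2.set (k + 1) (PySem.Int.mod (2 * Ak.2.getD k 0) pvMod)).getD (k + 1) 0
            = PySem.Int.mod (2 * Ak.2.getD k 0) pvMod := pv_getD_set_self (by rw [hL2]; omega)
        have h2 : (Ak.2.set (k + 1) (PySem.Int.mod (2 * Ak.2.getD k 0) pvMod)).getD ((j : Int)).toNat 0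
            = Ak.2.getD j 0 := by
          rw [Int.toNat_natCast]
          exact pv_getD_set_ne (by omega)
        rw [h1, h2, hdpj]
      rw [hAstep, hAstep']
      have hval : PySem.Int.mod (PySem.Int.mod (2 * Ak.2.getD k 0) pvMod - dpB s j) pvMod
          = dpB s (k + 1) := by
        rw [hdpsucc, hold, hdpk, hdpkS]
        exact pv_mod_key Bd.values.sum (dpB s j)
      refine ⟨by simp [hL1], by simp [hL2], ?_, ?_⟩
      · intro j' hj'
        rcases Nat.lt_or_ge j' (k + 1) with hj'' | hj''
        · rw [pv_getD_set_ne (by omega), pv_getD_set_ne (by omega)]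
          exact hb j' (by omega)
        · have : j' = k + 1 := by omega
          subst this
          rw [pv_getD_set_self (by simp [hL2]; omega), hval]
      · intro c hcc
        by_cases hceq : c = c0
        · subst hceq
          right
          refine ⟨k, by omega, ?_, ?_⟩
          · rw [pv_getD_set_self (by rw [hL1]; omega)]
          · rw [hBstep, hins, PySem.Dict.getD_insert]
            simp
        · have hne : c0.toNat ≠ c.toNat := fun h => hceq (pv_char_toNat_inj h.symm)
          rw [pv_getD_set_ne hne, hBstep, hins]
          rcases hc c hcc with ⟨h1, h2⟩ | ⟨j', hj1, hj2, hj3⟩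
          · left
            refine ⟨h1, ?_⟩
            rw [PySem.Dict.contains_insert]
            simp [hceq, h2]
          · right
            refine ⟨j', by omega, hj2, ?_⟩
            rw [PySem.Dict.getD_insert]
            simp [hceq, hj3]

theorem pv_count_eq (s : List Char) (hs : ∀ c ∈ s, c.toNat < 256) : countA s = countB s := by
  obtain ⟨-, -, hb, -⟩ := pv_invariant s hs s.length le_rfl
  have := hb s.length le_rfl
  rw [dpB, List.take_length] at this
  simpa [countA, countB] using this

theorem pv_dom_chars {s : String} (h : pvDomStr s = true) : ∀ c ∈ s.toList, c.toNat < 256 := by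
  intro c hc
  have := (List.all_eq_true.mp h) c hc
  simp only [pvDomChar, Bool.or_eq_true, Bool.and_eq_true, decide_eq_true_eq, beq_iff_eq] at this
  omega

-- ===== VERDICT (by name: the statement is the Claim_ definition above) =====
theorem betterString_spec : Claim_equal_betterString := by
  intro str1 str2 hdom
  rw [Dom_betterString] at hdom
  simp only [Bool.and_eq_true] at hdom
  obtain ⟨h1, h2⟩ := hdom
  unfold Spec_betterString betterString betterString_alt
  rw [pv_count_eq _ (pv_dom_chars h1), pv_count_eq _ (pv_dom_chars h2)]
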